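-- pv_equiv track=rewrite | github.com/linjimmy168/LeetcodePy | Google50.py | findMaxConsecutiveOnesII
-- ===== SOURCE A (Python) =====
-- def findMaxConsecutiveOnesII(nums):
--     """
--     :type nums: List[int]
--     :rtype: int
--     """
--     pre, curr, maxlen = -1, 0, 0
--     for n in nums:
--         if n == 0:
--             pre, curr = curr, 0
--         else:
--             curr += 1
--         maxlen = max(maxlen, pre + 1 + curr)
--     return maxlen
-- ===== SOURCE B (Python) =====
-- def findMaxConsecutiveOnesII(nums):
--     """
--     :type nums: List[int]
--     :rtype: int
--     """
--     # Stage 1: run-length encode the ones (runs separated by zeros).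
--     runs = [0]
--     for n in nums:
--         if n == 0:
--             runs.append(0)
--         else:
--             runs[-1] += 1
--     # Stage 2: best window = two adjacent runs joined by the flipped zero.
--     best = runs[0]
--     for a, b in zip(runs, runs[1:]):
--         best = max(best, a + 1 + b)
--     return best
-- ===== Notes on version B (the rewrite author's own statement) =====
-- stated objective: alternative
-- what changed: B is a staged two-pass algorithm: it first run-length-encodes the maximal blocks of ones into a list, then scans adjacent run pairs taking a+1+b, instead of A's single online scan with pre/curr accumulators.
import Mathlib
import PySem

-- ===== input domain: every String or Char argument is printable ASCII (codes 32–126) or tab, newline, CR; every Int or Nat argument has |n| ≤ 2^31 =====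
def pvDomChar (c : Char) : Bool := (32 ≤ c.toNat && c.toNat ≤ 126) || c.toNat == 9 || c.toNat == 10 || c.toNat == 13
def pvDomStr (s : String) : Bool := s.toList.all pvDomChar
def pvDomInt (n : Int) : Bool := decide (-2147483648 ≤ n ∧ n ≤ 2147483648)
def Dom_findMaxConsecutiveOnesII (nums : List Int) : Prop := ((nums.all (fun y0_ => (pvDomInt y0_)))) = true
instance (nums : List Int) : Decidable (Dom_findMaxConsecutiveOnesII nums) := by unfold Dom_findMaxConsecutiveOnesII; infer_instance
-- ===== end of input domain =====

-- B replaces A's single online scan (pre/curr run accumulators) by a staged two-pass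
-- algorithm: run-length-encode the blocks of ones, then scan adjacent run pairs (objective: alternative).

-- ===== PORT A =====
-- A's loop body: on 0, shift run lengths (pre, curr := curr, 0); else extend curr;
-- then maxlen := max(maxlen, pre + 1 + curr).
def stepA (s : Int × Int × Int) (n : Int) : Int × Int × Int :=
  let pre := s.1; let curr := s.2.1; let ml := s.2.2
  let pc := if n == 0 then (curr, (0 : Int)) else (pre, curr + 1)
  (pc.1, pc.2, max ml (pc.1 + 1 + pc.2))

def findMaxConsecutiveOnesII (nums : List Int) : Int :=
  (nums.foldl stepA (-1, 0, 0)).2.2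

-- ===== PORT B =====
-- runs[-1] += 1 : increment the last element of the runs list.
def pvIncLast : List Int → List Int
  | [] => []
  | [x] => [x + 1]
  | x :: xs => x :: pvIncLast xs

-- Stage 1 loop body: on 0 start a new run (append 0), else extend the last run.
def stepRuns (rs : List Int) (n : Int) : List Int :=
  if n == 0 then rs ++ [0] else pvIncLast rs

-- Stage 2: best = runs[0]; for a, b in zip(runs, runs[1:]): best = max(best, a+1+b).
def pvBest (runs : List Int) : Int :=
  (runs.zip runs.tail).foldl (fun best p => max best (p.1 + 1 + p.2)) (runs.headD 0)

def findMaxConsecutiveOnesII_alt (nums : List Int) : Int :=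
  pvBest (nums.foldl stepRuns [0])

-- ===== PRECONDITION & SPEC =====
def Spec_findMaxConsecutiveOnesII (nums : List Int) (out : Int) : Prop := out = findMaxConsecutiveOnesII_alt nums
instance (nums : List Int) (out : Int) : Decidable (Spec_findMaxConsecutiveOnesII nums out) := by unfold Spec_findMaxConsecutiveOnesII; infer_instance

-- ===== CLAIM (what is proved, stated in full; the proofs are below) =====
def Claim_equal_findMaxConsecutiveOnesII : Prop := ∀ (nums : List Int), Dom_findMaxConsecutiveOnesII nums → Spec_findMaxConsecutiveOnesII nums (findMaxConsecutiveOnesII nums)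

-- ===== LEMMAS AND PROOFS =====

-- Recursive form of B's second pass (accumulator over consecutive pairs).
def pvH : Int → List Int → Int
  | b, x :: y :: t => pvH (max b (x + 1 + y)) (y :: t)
  | b, _ => b

lemma pv_zip_foldl_eq_h : ∀ (l : List Int) (b : Int),
    (l.zip l.tail).foldl (fun best p => max best (p.1 + 1 + p.2)) b = pvH b l := by
  intro l
  induction l with
  | nil => intro b; simp [pvH]
  | cons x t ih =>
    intro b
    cases t with
    | nil => simp [pvH]
    | cons y t' =>
      simp only [List.tail_cons, List.zip_cons_cons, List.foldl_cons]
      exact (ih _).trans rfl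

lemma pvH_append : ∀ (xs : List Int) (b p c : Int),
    pvH b (xs ++ [p, c]) = max (pvH b (xs ++ [p])) (p + 1 + c) := by
  intro xs
  induction xs with
  | nil => intro b p c; simp [pvH]
  | cons a t ih =>
    intro b p c
    cases t with
    | nil => simp [pvH]
    | cons a2 t2 =>
      simp only [List.cons_append, pvH]
      exact ih _ _ _

lemma pv_headD_append (xs : List Int) (p c : Int) :
    ((xs ++ [p, c]).headD 0) = ((xs ++ [p]).headD 0) := by
  cases xs <;> simp

lemma pvBest_append (xs : List Int) (p c : Int) :
    pvBest (xs ++ [p, c]) = max (pvBest (xs ++ [p])) (p + 1 + c) := by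
  unfold pvBest
  rw [pv_zip_foldl_eq_h, pv_zip_foldl_eq_h, pv_headD_append]
  exact pvH_append xs _ p c

lemma pvIncLast_append : ∀ (xs : List Int) (x : Int),
    pvIncLast (xs ++ [x]) = xs ++ [x + 1] := by
  intro xs
  induction xs with
  | nil => intro x; simp [pvIncLast]
  | cons a t ih =>
    intro x
    cases t with
    | nil => simp [pvIncLast]
    | cons a2 t2 =>
      simp only [List.cons_append, pvIncLast]
      rw [show a2 :: (t2 ++ [x]) = (a2 :: t2) ++ [x] from rfl, ih]; simp

-- Loop invariant: A's pre is the run before the last zero (head of rs, -1 if none),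
-- its curr is the current run r, and its maxlen equals pvBest of the runs so far.
lemma pv_inv (nums : List Int) : ∀ (rs : List Int) (r ml : Int),
    ml = pvBest (rs.reverse ++ [r]) →
    (nums.foldl stepA (rs.headD (-1), r, ml)).2.2
      = pvBest (nums.foldl stepRuns (rs.reverse ++ [r])) := by
  induction nums with
  | nil => intro rs r ml h; simpa using h
  | cons n t ih =>
    intro rs r ml h
    by_cases hn : n = 0
    · subst hn
      have ha : stepA (rs.headD (-1), r, ml) 0 = (r, 0, max ml (r + 1)) := by
        simp [stepA]
      have hb : stepRuns (rs.reverse ++ [r]) 0 = (r :: rs).reverse ++ [0] := by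
        simp [stepRuns]
      rw [List.foldl_cons, List.foldl_cons, ha, hb]
      have hhd : (r :: rs).headD (-1) = r := rfl
      have hml : max ml (r + 1) = pvBest ((r :: rs).reverse ++ [0]) := by
        have : (r :: rs).reverse ++ [0] = rs.reverse ++ [r, 0] := by simp
        rw [this, pvBest_append, ← h]; omega
      rw [← hhd]
      exact ih (r :: rs) 0 _ hml
    · have ha : stepA (rs.headD (-1), r, ml) n
          = (rs.headD (-1), r + 1, max ml (rs.headD (-1) + 1 + (r + 1))) := by
        simp [stepA, hn]
      have hb : stepRuns (rs.reverse ++ [r]) n = rs.reverse ++ [r + 1] := by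
        simp [stepRuns, hn, pvIncLast_append]
      rw [List.foldl_cons, List.foldl_cons, ha, hb]
      have hml : max ml (rs.headD (-1) + 1 + (r + 1)) = pvBest (rs.reverse ++ [r + 1]) := by
        cases rs with
        | nil =>
          subst h; simp [pvBest]
        | cons p ps =>
          have e1 : (p :: ps).reverse ++ [r + 1] = ps.reverse ++ [p, r + 1] := by simp
          have e2 : (p :: ps).reverse ++ [r] = ps.reverse ++ [p, r] := by simp
          rw [e1, pvBest_append]
          rw [e2, pvBest_append] at h
          simp only [List.headD_cons]
          omega
      exact ih rs (r + 1) _ hml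

-- ===== VERDICT (by name: the statement is the Claim_ definition above) =====
theorem findMaxConsecutiveOnesII_spec : Claim_equal_findMaxConsecutiveOnesII := by
  intro nums _
  unfold Spec_findMaxConsecutiveOnesII findMaxConsecutiveOnesII findMaxConsecutiveOnesII_alt
  have h0 : (0 : Int) = pvBest (([] : List Int).reverse ++ [0]) := by
    simp [pvBest]
  have := pv_inv nums [] 0 0 h0
  simpa using this
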